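-- pv_equiv track=rewrite | github.com/seungwonB/Programmers | LV2/신고 결과 받기.py | solution
-- ===== SOURCE A (Python) =====
-- from collections import defaultdict
--
-- def solution(id_list, report, k):
--     report = list(set(report))
--     answer = []
--     send_report = defaultdict(set)
--     get_report = defaultdict(int)
--
--     for i in report:
--         send_user, get_user = i.split()
--         send_report[send_user].add(get_user)
--         get_report[get_user] += 1
--
--     for i in id_list:
--         result = 0
--         for j in send_report[i]:
--             if get_report[j] >= k:
--                 result += 1
--         answer.append(result)
--
--     return answer
-- ===== SOURCE B (Python) =====
-- def solution(id_list, report, k):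
--     # sort-based threshold: dedupe reports in order, find banned targets by a
--     # run-length scan over the sorted target list, count per id over the flat edges
--     edges = [tuple(r.split()) for r in dict.fromkeys(report)]
--     ts = sorted(t for _, t in edges)
--     banned = set()
--     prev, run = None, 0
--     for t in ts:
--         run = run + 1 if t == prev else 1
--         prev = t
--         if run >= k:
--             banned.add(t)
--     uniq_edges = list(dict.fromkeys(edges))
--     return [sum(1 for s, t in uniq_edges if s == u and t in banned)
--             for u in id_list]
-- ===== Notes on version B (the rewrite author's own statement) =====
-- stated objective: alternative
-- what changed: A counts reports with a hash counter and answers each id from a sender->target-set adjacency index; B uses no counters or adjacency: it dedupes reports in first-seen order, sorts the target list and finds banned targets by a run-length scan over the sorted runs, then answers each id by filter-counting the flat deduped edge list.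
import Mathlib
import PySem

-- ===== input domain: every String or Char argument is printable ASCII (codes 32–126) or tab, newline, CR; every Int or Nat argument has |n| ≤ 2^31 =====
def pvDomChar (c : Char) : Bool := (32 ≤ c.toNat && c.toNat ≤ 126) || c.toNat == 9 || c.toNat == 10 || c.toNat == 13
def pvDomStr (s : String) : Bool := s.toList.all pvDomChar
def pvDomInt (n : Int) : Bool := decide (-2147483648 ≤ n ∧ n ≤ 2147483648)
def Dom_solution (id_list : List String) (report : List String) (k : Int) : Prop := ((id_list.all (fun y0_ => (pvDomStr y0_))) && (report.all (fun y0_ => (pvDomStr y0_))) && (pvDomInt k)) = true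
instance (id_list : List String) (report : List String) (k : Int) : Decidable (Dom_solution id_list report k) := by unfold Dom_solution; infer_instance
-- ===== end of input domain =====

-- B replaces A's hash counter + sender->target-set adjacency index by an ordered dedup, a sort of the
-- target list with a run-length scan for the banned targets, and a flat filter-count of the deduped
-- edge list per id (alternative sort-then-scan decomposition, no speed claim).


-- ===== PORT A =====
def solution (id_list : List String) (report : List String) (k : Int) : List Int :=
  let report' : List String := PySem.Set.ofList report
  let dicts := report'.foldl
    (fun (st : PySem.Dict String (PySem.Set String) × PySem.Dict String Int) i =>
      match PySem.Str.split₀ i with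
      | [send_user, get_user] =>
          (st.1.modify send_user [] (fun s => PySem.Set.add s get_user),
           st.2.modify get_user 0 (· + 1))
      | _ => st)  -- Python raises ValueError (unpacking) here; excluded by Pre_solution
    (PySem.Dict.empty, PySem.Dict.empty)
  let send_report := dicts.1
  let get_report := dicts.2
  id_list.foldl
    (fun answer i =>
      answer ++ [(send_report.getD i []).foldl
        (fun result j => if get_report.getD j 0 ≥ k then result + 1 else result) 0])
    []

-- ===== PORT B =====
-- tuple(r.split()); arity ≠ 2 is unreachable under Pre_solution (Python B raises there at unpacking)
def pvParse (r : String) : String × String :=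
  ((PySem.Str.split₀ r).headD "", (PySem.Str.split₀ r).tail.headD "")

-- one iteration of B's run-length scan: state (prev, run, banned)
def pvStep (k : Int) (st : Option String × Int × PySem.Set String) (t : String) :
    Option String × Int × PySem.Set String :=
  let run : Int := if st.1 = some t then st.2.1 + 1 else 1
  (some t, run, if run ≥ k then PySem.Set.add st.2.2 t else st.2.2)

def solution_alt (id_list : List String) (report : List String) (k : Int) : List Int :=
  let edges := (PySem.List.dedup report).map pvParse
  let ts := PySem.List.sorted (edges.map (·.2)) (fun x => x) false
  let fin := ts.foldl (pvStep k) (none, 0, PySem.Set.empty)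
  let banned := fin.2.2
  let uniq_edges := PySem.List.dedup edges
  id_list.map (fun u =>
    uniq_edges.foldl
      (fun acc p => if p.1 == u && PySem.Set.contains banned p.2 then acc + 1 else acc)
      (0 : Int))

-- ===== PRECONDITION & SPEC =====
-- Pre_ excludes exactly the inputs where some report string does not split into two
-- whitespace-separated words: there Python A (and B) raises ValueError on tuple unpacking.
def Pre_solution (id_list : List String) (report : List String) (k : Int) : Prop :=
  ∀ r ∈ report, (PySem.Str.split₀ r).length = 2
instance (id_list : List String) (report : List String) (k : Int) : Decidable (Pre_solution id_list report k) := by unfold Pre_solution; infer_instance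

def pvWitness_solution : List String × List String × Int :=
  (["muzi", "frodo", "apeach"], ["muzi frodo", "apeach frodo", "muzi frodo"], 2)

def Spec_solution (id_list : List String) (report : List String) (k : Int) (out : List Int) : Prop := out = solution_alt id_list report k
instance (id_list : List String) (report : List String) (k : Int) (out : List Int) : Decidable (Spec_solution id_list report k out) := by unfold Spec_solution; infer_instance

-- ===== CLAIM (what is proved, stated in full; the proofs are below) =====
def Claim_equal_solution : Prop := ∀ (id_list : List String) (report : List String) (k : Int), Dom_solution id_list report k → Pre_solution id_list report k → Spec_solution id_list report k (solution id_list report k)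

-- ===== LEMMAS AND PROOFS =====

-- the parsed (sender, target) pair of one report string, `none` where Python's unpacking raises
def pvPair? (r : String) : Option (String × String) :=
  match PySem.Str.split₀ r with
  | [s, t] => some (s, t)
  | _ => none

-- A's single building loop is the pair of two folds over the parsed pairs
theorem pvFoldA_eq (l : List String)
    (d1 : PySem.Dict String (PySem.Set String)) (d2 : PySem.Dict String Int) :
    l.foldl
      (fun (st : PySem.Dict String (PySem.Set String) × PySem.Dict String Int) i =>
        match PySem.Str.split₀ i with
        | [su, gu] => (st.1.modify su [] (fun s => PySem.Set.add s gu),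
                       st.2.modify gu 0 (· + 1))
        | _ => st) (d1, d2)
    = ((l.filterMap pvPair?).foldl
         (fun d p => d.modify p.1 [] (fun s => PySem.Set.add s p.2)) d1,
       (l.filterMap pvPair?).foldl (fun d p => d.modify p.2 0 (· + 1)) d2) := by
  induction l generalizing d1 d2 with
  | nil => simp
  | cons hd tl ih =>
    simp only [List.foldl_cons, List.filterMap_cons]
    rcases hsp : PySem.Str.split₀ hd with _ | ⟨s, _ | ⟨t, _ | ⟨x, rest⟩⟩⟩ <;>
      simp [pvPair?, hsp, ih]

theorem pvAdd_mem {a : Type} [BEq a] [LawfulBEq a] (es : PySem.Set a) (x : a)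
    (h : x ∈ es) : PySem.Set.add es x = es := by
  simp only [PySem.Set.add, (PySem.Set.contains_iff es x).mpr h, if_true]

theorem pvAdd_not_mem {a : Type} [BEq a] [LawfulBEq a] (es : PySem.Set a) (x : a)
    (h : x ∉ es) : PySem.Set.add es x = es ++ [x] := by
  have hc : PySem.Set.contains es x = false := by
    cases hc : PySem.Set.contains es x
    · rfl
    · exact absurd ((PySem.Set.contains_iff es x).mp hc) h
  simp only [PySem.Set.add, hc, Bool.false_eq_true, if_false]

-- A's sender->target-set dict read at u is the target list of u's edges
theorem pvSend_edges (ps : List (String × String))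
    (d : PySem.Dict String (PySem.Set String)) (es : PySem.Set (String × String))
    (h : ∀ u, d.getD u [] = (es.filter (fun p => p.1 == u)).map (·.2)) (u : String) :
    (ps.foldl (fun d p => d.modify p.1 [] (fun s => PySem.Set.add s p.2)) d).getD u []
    = ((ps.foldl PySem.Set.add es).filter (fun p => p.1 == u)).map (·.2) := by
  induction ps generalizing d es with
  | nil => simpa using h u
  | cons hd tl ih =>
    obtain ⟨a, b⟩ := hd
    simp only [List.foldl_cons]
    refine ih _ _ (fun v => ?_)
    by_cases hv : v = a
    · subst hv
      rw [PySem.Dict.getD_modify_self, h v]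
      by_cases hmem : (v, b) ∈ es
      · have hts : b ∈ (es.filter (fun p => p.1 == v)).map (·.2) :=
          List.mem_map.mpr ⟨(v, b), List.mem_filter.mpr ⟨hmem, by simp⟩, rfl⟩
        rw [pvAdd_mem es (v, b) hmem, pvAdd_mem _ b hts]
      · have hts : b ∉ (es.filter (fun p => p.1 == v)).map (·.2) := by
          intro hmm
          obtain ⟨p, hpf, hp2⟩ := List.mem_map.mp hmm
          obtain ⟨hpes, hp1⟩ := List.mem_filter.mp hpf
          have h1 : p.1 = v := by simpa using hp1
          have hpvb : p = (v, b) := Prod.ext h1 hp2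
          exact hmem (hpvb ▸ hpes)
        rw [pvAdd_not_mem es (v, b) hmem, pvAdd_not_mem _ b hts]
        simp [List.filter_append]
    · rw [PySem.Dict.getD_modify_of_ne _ _ _ hv, h v]
      by_cases hmem : (a, b) ∈ es
      · rw [pvAdd_mem es (a, b) hmem]
      · rw [pvAdd_not_mem es (a, b) hmem]
        simp [List.filter_append, Ne.symm hv]

-- under Pre_, parsing by filterMap (A's loop) and by total map (B's comprehension) agree
theorem pvFilterMap_eq_map (l : List String)
    (h : ∀ r ∈ l, (PySem.Str.split₀ r).length = 2) :
    l.filterMap pvPair? = l.map pvParse := by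
  induction l with
  | nil => rfl
  | cons hd tl ih =>
    have hh := h hd (by simp)
    have htl := ih (fun r hr => h r (by simp [hr]))
    rcases hsp : PySem.Str.split₀ hd with _ | ⟨s, _ | ⟨t, _ | ⟨x, rest⟩⟩⟩
    · simp [hsp] at hh
    · simp [hsp] at hh
    · have hpp : pvPair? hd = some (pvParse hd) := by simp [pvPair?, pvParse, hsp]
      simp [hpp, htl]
    · simp [hsp] at hh

-- B's run-length scan over the sorted target list collects exactly the targets whose
-- total count reaches k (invariant over the remaining sorted suffix)
theorem pvRun_spec (k : Int) (ts : List String) : ts.Pairwise (· ≤ ·) →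
    ∀ (prev : Option String) (run : Int) (b : PySem.Set String),
    (∀ t ∈ ts, ∀ p, prev = some p → p ≤ t) → ∀ v,
    (v ∈ (ts.foldl (pvStep k) (prev, run, b)).2.2
    ↔ v ∈ b ∨ (v ∈ ts ∧ k ≤ (if prev = some v then run else 0) + (ts.count v : Int))) := by
  induction ts with
  | nil => intro _ prev run b _ v; simp
  | cons t tl ih =>
    intro hs prev run b hle v
    have htl : tl.Pairwise (· ≤ ·) := hs.tail
    have hthead : ∀ x ∈ tl, t ≤ x := fun x hx => List.rel_of_pairwise_cons hs hx
    simp only [List.foldl_cons, pvStep]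
    rw [ih htl (some t) _ _
      (by intro x hx p hp; injection hp with h; exact h ▸ hthead x hx) v]
    have hc0 : (0 : Int) ≤ (tl.count v : Int) := Int.natCast_nonneg _
    by_cases hv : v = t
    · subst hv
      have hcnt : List.count v (v :: tl) = List.count v tl + 1 := by
        simp
      have hmemc : v ∈ v :: tl := by simp
      simp only [ite_true]
      by_cases hpt : prev = some v
      · simp only [if_pos hpt]
        by_cases hrk : run + 1 ≥ k
        · simp only [if_pos hrk, PySem.Set.mem_add]
          constructor
          · rintro ((hb | _) | ⟨_, hk⟩)
            · exact Or.inl hb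
            · exact Or.inr ⟨hmemc, by omega⟩
            · exact Or.inr ⟨hmemc, by omega⟩
          · rintro (hb | ⟨_, hk⟩)
            · exact Or.inl (Or.inl hb)
            · exact Or.inl (Or.inr trivial)
        · simp only [if_neg hrk]
          constructor
          · rintro (hb | ⟨_, hk⟩)
            · exact Or.inl hb
            · exact Or.inr ⟨hmemc, by omega⟩
          · rintro (hb | ⟨_, hk⟩)
            · exact Or.inl hb
            · have hct : 1 ≤ (tl.count v : Int) := by omega
              have hmem : v ∈ tl := by
                have hpos : 0 < tl.count v := by exact_mod_cast lt_of_lt_of_le zero_lt_one hct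
                exact List.count_pos_iff.mp hpos
              exact Or.inr ⟨hmem, by omega⟩
      · simp only [if_neg hpt]
        by_cases hrk : (1 : Int) ≥ k
        · simp only [if_pos hrk, PySem.Set.mem_add]
          constructor
          · rintro ((hb | _) | ⟨_, hk⟩)
            · exact Or.inl hb
            · exact Or.inr ⟨hmemc, by omega⟩
            · exact Or.inr ⟨hmemc, by omega⟩
          · rintro (hb | ⟨_, hk⟩)
            · exact Or.inl (Or.inl hb)
            · exact Or.inl (Or.inr trivial)
        · simp only [if_neg hrk]
          constructor
          · rintro (hb | ⟨_, hk⟩)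
            · exact Or.inl hb
            · exact Or.inr ⟨hmemc, by omega⟩
          · rintro (hb | ⟨_, hk⟩)
            · exact Or.inl hb
            · have hct : 1 ≤ (tl.count v : Int) := by omega
              have hmem : v ∈ tl := by
                have hpos : 0 < tl.count v := by exact_mod_cast lt_of_lt_of_le zero_lt_one hct
                exact List.count_pos_iff.mp hpos
              exact Or.inr ⟨hmem, by omega⟩
    · have hvt : ¬t = v := fun h => hv h.symm
      have hcnt : List.count v (t :: tl) = List.count v tl := by
        simp [hvt]
      rw [hcnt]
      have hts : ¬ ((some t : Option String) = some v) := by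
        simp only [Option.some.injEq]
        exact fun h' => hv h'.symm
      rw [if_neg hts]
      have hbb : (v ∈ (if (if prev = some t then run + 1 else 1) ≥ k
          then PySem.Set.add b t else b)) ↔ v ∈ b := by
        by_cases hrk : (if prev = some t then run + 1 else 1) ≥ k
        · simp only [if_pos hrk, PySem.Set.mem_add]
          exact ⟨fun h => h.elim id (fun h' => absurd h' hv), Or.inl⟩
        · simp [if_neg hrk]
      rw [hbb]
      by_cases hp : prev = some v
      · have hvnotc : v ∉ t :: tl := by
          intro hvm
          rcases List.mem_cons.mp hvm with h | hvtl
          · exact hv h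
          · exact hv (le_antisymm (hle t (by simp) v hp) (hthead v hvtl))
        constructor
        · rintro (hb | ⟨hmem, _⟩)
          · exact Or.inl hb
          · exact absurd (List.mem_cons_of_mem t hmem) hvnotc
        · rintro (hb | ⟨hmem, _⟩)
          · exact Or.inl hb
          · exact absurd hmem hvnotc
      · simp only [if_neg hp]
        simp [hv]

theorem solution_eq_alt (id_list : List String) (report : List String) (k : Int)
    (hpre : ∀ r ∈ report, (PySem.Str.split₀ r).length = 2) :
    solution id_list report k = solution_alt id_list report k := by
  unfold solution solution_alt
  simp only [pvFoldA_eq]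
  have hmap : (PySem.Set.ofList report : List String).filterMap pvPair?
      = (PySem.Set.ofList report : List String).map pvParse :=
    pvFilterMap_eq_map _ (fun r hr => hpre r ((PySem.Set.mem_ofList report r).mp hr))
  rw [hmap]
  have hcounter : ((PySem.Set.ofList report : List String).map pvParse).foldl
      (fun d p => d.modify p.2 0 (· + 1)) PySem.Dict.empty
      = PySem.Dict.counter (((PySem.Set.ofList report : List String).map pvParse).map (·.2)) := by
    rw [PySem.Dict.counter_eq_foldl]
    conv_rhs => rw [List.foldl_map]
  have hedges : ((PySem.Set.ofList report : List String).map pvParse).foldl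
      PySem.Set.add PySem.Set.empty
      = PySem.Set.ofList ((PySem.Set.ofList report : List String).map pvParse) := by
    rw [PySem.Set.ofList_eq_foldl]; rfl
  rw [hcounter, PySem.List.foldl_append_singleton_eq_map]
  refine List.map_congr_left (fun u _ => ?_)
  -- A's inner counting loop, as countP over the deduped edge list
  rw [pvSend_edges _ PySem.Dict.empty PySem.Set.empty (fun v => by simp) u,
      hedges, PySem.List.foldl_ite_add_one, List.countP_map, List.countP_filter]
  -- B's flat counting loop, as countP over the same list
  rw [PySem.List.foldl_if_add_one]
  simp only [PySem.List.dedup_eq_ofList, zero_add]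
  refine congrArg _ ?_
  refine List.countP_congr (fun p hp => ?_)
  have hppairs : p ∈ (PySem.Set.ofList report : List String).map pvParse :=
    (PySem.Set.mem_ofList _ p).mp hp
  have hpt : p.2 ∈ ((PySem.Set.ofList report : List String).map pvParse).map (·.2) :=
    List.mem_map.mpr ⟨p, hppairs, rfl⟩
  have hperm : (PySem.List.sorted (((PySem.Set.ofList report : List String).map pvParse).map (·.2))
      (fun x => x) false).Perm (((PySem.Set.ofList report : List String).map pvParse).map (·.2)) :=
    PySem.List.sorted_perm _ (fun x => x) false
  have hbanned : PySem.Set.contains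
      ((PySem.List.sorted (((PySem.Set.ofList report : List String).map pvParse).map (·.2))
          (fun x => x) false).foldl (pvStep k)
        ((none : Option String), (0 : Int), (PySem.Set.empty : PySem.Set String))).2.2 p.2
      = decide ((PySem.Dict.counter (((PySem.Set.ofList report : List String).map pvParse).map (·.2))).getD p.2 0 ≥ k) := by
    have hspec := pvRun_spec k _
      (PySem.List.sorted_pairwise (((PySem.Set.ofList report : List String).map pvParse).map (·.2)) (fun x => x))
      none 0 PySem.Set.empty (by intro t _ q hq; cases hq) p.2
    rw [PySem.Dict.getD_counter]
    have hcount := hperm.count_eq p.2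
    by_cases hk : (((((PySem.Set.ofList report : List String).map pvParse).map (·.2)).count p.2 : Int) ≥ k)
    · have hmem : p.2 ∈ PySem.List.sorted (((PySem.Set.ofList report : List String).map pvParse).map (·.2))
          (fun x => x) false := hperm.mem_iff.mpr hpt
      have hin : p.2 ∈ ((PySem.List.sorted (((PySem.Set.ofList report : List String).map pvParse).map (·.2))
          (fun x => x) false).foldl (pvStep k)
          ((none : Option String), (0 : Int), (PySem.Set.empty : PySem.Set String))).2.2 :=
        hspec.mpr (Or.inr ⟨hmem, by rw [hcount]; simpa using hk⟩)
      rw [(PySem.Set.contains_iff _ p.2).mpr hin]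
      symm
      simpa using hk
    · have hnot : p.2 ∉ ((PySem.List.sorted (((PySem.Set.ofList report : List String).map pvParse).map (·.2))
          (fun x => x) false).foldl (pvStep k)
          ((none : Option String), (0 : Int), (PySem.Set.empty : PySem.Set String))).2.2 := by
        intro hmem
        rcases hspec.mp hmem with h | ⟨_, hk'⟩
        · simp at h
        · refine hk ?_
          rw [hcount] at hk'
          simpa using hk'
      have hcf : PySem.Set.contains
          ((PySem.List.sorted (((PySem.Set.ofList report : List String).map pvParse).map (·.2))
              (fun x => x) false).foldl (pvStep k)
            ((none : Option String), (0 : Int), (PySem.Set.empty : PySem.Set String))).2.2 p.2 = false := by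
        cases hc : PySem.Set.contains
            ((PySem.List.sorted (((PySem.Set.ofList report : List String).map pvParse).map (·.2))
                (fun x => x) false).foldl (pvStep k)
              ((none : Option String), (0 : Int), (PySem.Set.empty : PySem.Set String))).2.2 p.2
        · rfl
        · exact absurd ((PySem.Set.contains_iff _ _).mp hc) hnot
      rw [hcf]
      symm
      simpa using hk
  simp only [Function.comp_apply]
  rw [hbanned, PySem.Dict.getD_counter, Bool.and_comm]

-- ===== VERDICT (by name: the statement is the Claim_ definition above) =====
theorem solution_spec : Claim_equal_solution := by
  intro id_list report k _ hpre
  unfold Spec_solution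
  exact solution_eq_alt id_list report k hpre
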